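-- pv_equiv track=rewrite | github.com/cjl0701/CodingTest | greedy/무지의 먹방 라이브.py | solution
-- ===== SOURCE A (Python) =====
-- import heapq
--
-- def solution(food_times, k):
--     # k초 후에 섭취해야 할 음식이 없다면 -1
--     if sum(food_times) <= k:
--         return -1
--     # 가장 작은 음식부터 빼고 시간을 센다
--     # 이를 위해 최소힙을 만든다.
--     h = []
--     for i, v in enumerate(food_times):
--         heapq.heappush(h, (v, i + 1))  # v가 우선순위 기준
--     t = 0  # 먹기 위해 사용한 시간
--     previous = 0  # 직전에 다 먹은 음식 시간
--     while t + (h[0][0] - previous) * len(h) <= k: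
--         t += (h[0][0] - previous) * len(h)
--         previous = heapq.heappop(h)[0]
--     # 남은 음식을 0으로 만들지 못하니 다 세면 된다.
--     h.sort(key=lambda x: x[1])  # 음식 번호 기준으로 정렬
--     rest = (k - t) % len(h)  # 남은 음식 중에서 몇 번째 음식인지 확인
--     return h[rest][1]
-- ===== SOURCE B (Python) =====
-- def solution(food_times, k):
--     if sum(food_times) <= k:
--         return -1
--     n = len(food_times)
--     # binary search for the unique level v with g(v) <= k < g(v+1),
--     # where g(v) = sum(min(f, v)) = seconds needed to eat every food down to level v
--     lo = k // n          # g(lo) <= n*lo <= k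
--     hi = max(food_times)  # g(hi) = sum(food_times) > k
--     while lo + 1 < hi:
--         mid = (lo + hi) // 2
--         if sum(min(f, mid) for f in food_times) <= k:
--             lo = mid
--         else:
--             hi = mid
--     t = sum(min(f, lo) for f in food_times)
--     survivors = [i + 1 for i, f in enumerate(food_times) if f > lo]
--     return survivors[(k - t) % len(survivors)]
-- ===== Notes on version B (the rewrite author's own statement) =====
-- stated objective: alternative
-- what changed: Replaces the heap-pop layer simulation by a binary search on the eating level v characterised by sum(min(f,v)) <= k < sum(min(f,v+1)); no heap and no sorting at all - the surviving foods are read off the original list in index order.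
import Mathlib
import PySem

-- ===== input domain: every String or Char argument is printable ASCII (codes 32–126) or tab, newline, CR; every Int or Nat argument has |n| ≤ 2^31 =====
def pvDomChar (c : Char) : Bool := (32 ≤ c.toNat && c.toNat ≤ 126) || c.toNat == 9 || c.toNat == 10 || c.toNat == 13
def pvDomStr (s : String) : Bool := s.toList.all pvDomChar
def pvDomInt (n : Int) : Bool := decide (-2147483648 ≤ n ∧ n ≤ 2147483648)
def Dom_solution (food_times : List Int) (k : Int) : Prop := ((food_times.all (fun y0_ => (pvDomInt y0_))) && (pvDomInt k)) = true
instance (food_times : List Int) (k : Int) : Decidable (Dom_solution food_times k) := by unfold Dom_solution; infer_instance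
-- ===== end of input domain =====

-- B replaces A's heap-pop layer simulation by a binary search on the eating level v with
-- sum(min(f,v)) ≤ k < sum(min(f,v+1)); no heap and no sorting (objective: alternative).

-- ===== PORT A =====
-- heapq on tuples is modelled by its contract: the heap holds a multiset of (time, index)
-- pairs; h[0] is the lexicographically least pair (unique here: indices are distinct) and
-- heappop removes it.  Only the multiset is observed afterwards (h.sort(key=index)), so the
-- internal array layout of the binary heap is irrelevant; this model is exact here.
def pvLt (a b : Int × Int) : Bool :=
  decide (a.1 < b.1) || (!(decide (b.1 < a.1)) && decide (a.2 < b.2))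

-- h[0] of the heap: the least pair of h (first occurrence), none on the empty heap (IndexError)
def pvFindMin : List (Int × Int) → Option (Int × Int)
  | [] => none
  | x :: xs =>
    match pvFindMin xs with
    | none => some x
    | some m => some (if pvLt m x then m else x)

-- needed by aLoop's termination proof, so it stays above the port
theorem pvFindMin_mem : ∀ {h : List (Int × Int)} {m : Int × Int}, pvFindMin h = some m → m ∈ h := by
  intro h
  induction h with
  | nil => intro m hm; simp [pvFindMin] at hm
  | cons x xs ih =>
    intro m hm
    simp only [pvFindMin] at hm
    cases hfm : pvFindMin xs with
    | none => rw [hfm] at hm; simp at hm; simp [hm]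
    | some m' =>
      rw [hfm] at hm
      simp at hm
      by_cases hlt : pvLt m' x = true
      · simp [hlt] at hm; subst hm; exact List.mem_cons_of_mem _ (ih hfm)
      · simp [hlt] at hm; simp [hm]

-- A's while loop: pop the least pair while its cost fits, else count off the rest
def aLoop (k : Int) (h : List (Int × Int)) (t previous : Int) : Int :=
  match hm : pvFindMin h with
  | none => 0  -- Python: h[0] raises IndexError (empty heap); unreachable under Pre_
  | some m =>
    if t + (m.1 - previous) * (h.length : Int) ≤ k then
      aLoop k (h.erase m) (t + (m.1 - previous) * (h.length : Int)) m.1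
    else
      match PySem.List.pyGet? (PySem.List.sorted h (fun p => p.2))
              (PySem.Int.mod (k - t) (h.length : Int)) with
      | some p => p.2
      | none => 0  -- unreachable: the index is a mod by the positive length
termination_by h.length
decreasing_by
  have hmem := pvFindMin_mem hm
  have := List.length_erase_of_mem hmem
  have := List.length_pos_of_mem hmem
  omega

def solution (food_times : List Int) (k : Int) : Int :=
  if food_times.sum ≤ k then -1
  else
    aLoop k ((PySem.List.enumerate food_times 0).foldl
              (fun h iv => h ++ [(iv.2, iv.1 + 1)]) []) 0 0

-- ===== PORT B =====
-- B's binary search: invariant g(lo) ≤ k < g(hi) where g(v) = Σ min(f, v)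
def bsearchB (food_times : List Int) (k lo hi : Int) : Int :=
  if lo + 1 < hi then
    if (food_times.map (fun f => min f (PySem.Int.floordiv (lo + hi) 2))).sum ≤ k then
      bsearchB food_times k (PySem.Int.floordiv (lo + hi) 2) hi
    else
      bsearchB food_times k lo (PySem.Int.floordiv (lo + hi) 2)
  else lo
termination_by (hi - lo).toNat
decreasing_by
  · rw [PySem.Int.floordiv_eq_ediv_of_pos (by omega : (0:Int) < 2)]; omega
  · rw [PySem.Int.floordiv_eq_ediv_of_pos (by omega : (0:Int) < 2)]; omega

def solution_alt (food_times : List Int) (k : Int) : Int :=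
  if food_times.sum ≤ k then -1
  else
    let lo := PySem.Int.floordiv k (food_times.length : Int)  -- Python: k // n (ZeroDivisionError on []; unreachable under Pre_)
    let hi := match PySem.List.max? food_times (fun x => x) with
              | some m => m
              | none => 0  -- Python: max([]) raises ValueError; unreachable under Pre_
    let v := bsearchB food_times k lo hi
    let t := (food_times.map (fun f => min f v)).sum
    let survivors := ((PySem.List.enumerate food_times 0).filter
                        (fun iv => decide (v < iv.2))).map (fun iv => iv.1 + 1)
    match PySem.List.pyGet? survivors (PySem.Int.mod (k - t) (survivors.length : Int)) with
    | some x => x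
    | none => 0  -- unreachable: the index is a mod by the positive length

-- ===== PRECONDITION & SPEC =====
-- Pre_ excludes only the inputs where A raises: food_times = [] with k < 0 reaches h[0]
-- on the empty heap (IndexError); on every other input A returns normally.
def Pre_solution (food_times : List Int) (k : Int) : Prop := food_times ≠ [] ∨ 0 ≤ k
instance (food_times : List Int) (k : Int) : Decidable (Pre_solution food_times k) := by
  unfold Pre_solution; infer_instance

def pvWitness_solution : List Int × Int := ([3, 1, 2], 5)

def Spec_solution (food_times : List Int) (k : Int) (out : Int) : Prop := out = solution_alt food_times k
instance (food_times : List Int) (k : Int) (out : Int) : Decidable (Spec_solution food_times k out) := by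
  unfold Spec_solution; infer_instance

-- ===== CLAIM (what is proved, stated in full; the proofs are below) =====
def Claim_equal_solution : Prop := ∀ (food_times : List Int) (k : Int), Dom_solution food_times k → Pre_solution food_times k → Spec_solution food_times k (solution food_times k)

-- ===== LEMMAS AND PROOFS =====

-- the lexicographic order on pairs, as a Prop
theorem pvLt_iff (a b : Int × Int) :
    pvLt a b = true ↔ (a.1 < b.1 ∨ (¬ b.1 < a.1 ∧ a.2 < b.2)) := by
  simp [pvLt]

theorem pvLe_antisymm {a b : Int × Int} (hab : pvLt a b = false) (hba : pvLt b a = false) :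
    a = b := by
  rw [← Bool.not_eq_true, pvLt_iff] at hab hba
  have h1 : a.1 = b.1 := by omega
  have h2 : a.2 = b.2 := by omega
  exact Prod.ext h1 h2

theorem pvLe_trans {a b c : Int × Int} (hab : pvLt b a = false) (hbc : pvLt c b = false) :
    pvLt c a = false := by
  rw [← Bool.not_eq_true, pvLt_iff] at hab hbc ⊢
  omega

-- sorted2 with keys fst, snd is insertion sort by pvLt (by definition)
theorem sorted2_eq_foldl (xs : List (Int × Int)) :
    PySem.List.sorted2 xs Prod.fst Prod.snd =
      xs.foldl (fun acc x => PySem.List.insertBy pvLt x acc) [] := rfl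

theorem insertBy_pvLt_pairwise {x : Int × Int} {ys : List (Int × Int)}
    (h : ys.Pairwise (fun a b => pvLt b a = false)) :
    (PySem.List.insertBy pvLt x ys).Pairwise (fun a b => pvLt b a = false) := by
  induction ys with
  | nil => simp [PySem.List.insertBy]
  | cons y ys ih =>
    rw [List.pairwise_cons] at h
    obtain ⟨hy, hys⟩ := h
    by_cases hxy : pvLt x y = true
    · simp only [PySem.List.insertBy, hxy, if_pos]
      refine List.Pairwise.cons ?_ (List.Pairwise.cons hy hys)
      intro z hz
      rw [← Bool.not_eq_true, pvLt_iff]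
      rcases List.mem_cons.mp hz with rfl | hz
      · rw [pvLt_iff] at hxy; omega
      · have hzy := hy z hz
        rw [← Bool.not_eq_true, pvLt_iff] at hzy
        rw [pvLt_iff] at hxy
        omega
    · simp only [PySem.List.insertBy, hxy, if_neg, Bool.false_eq_true, not_false_iff]
      refine List.Pairwise.cons ?_ (ih hys)
      intro z hz
      rcases (PySem.List.mem_insertBy _ _ _ _).mp hz with rfl | hz
      · exact Bool.eq_false_iff.mpr hxy
      · exact hy z hz

theorem sorted2_pvLt_pairwise (xs : List (Int × Int)) :
    (PySem.List.sorted2 xs Prod.fst Prod.snd).Pairwise (fun a b => pvLt b a = false) := by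
  rw [sorted2_eq_foldl]
  suffices h : ∀ (acc : List (Int × Int)), acc.Pairwise (fun a b => pvLt b a = false) →
      (xs.foldl (fun acc x => PySem.List.insertBy pvLt x acc) acc).Pairwise
        (fun a b => pvLt b a = false) by
    exact h [] (by simp)
  induction xs with
  | nil => intro acc hacc; simpa using hacc
  | cons x xs ih =>
    intro acc hacc
    exact ih _ (insertBy_pvLt_pairwise hacc)

theorem pvFindMin_eq_none_iff {h : List (Int × Int)} : pvFindMin h = none ↔ h = [] := by
  cases h with
  | nil => simp [pvFindMin]
  | cons x xs =>
    simp only [pvFindMin]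
    constructor
    · intro hc
      cases hfm : pvFindMin xs <;> rw [hfm] at hc <;> simp at hc
    · intro hc; simp at hc

theorem pvFindMin_min : ∀ {h : List (Int × Int)} {m : Int × Int}, pvFindMin h = some m →
    ∀ y ∈ h, pvLt y m = false := by
  intro h
  induction h with
  | nil => intro m hm; simp [pvFindMin] at hm
  | cons x xs ih =>
    intro m hm y hy
    simp only [pvFindMin] at hm
    cases hfm : pvFindMin xs with
    | none =>
      rw [hfm] at hm; simp at hm; subst hm
      have hxs : xs = [] := pvFindMin_eq_none_iff.mp hfm
      subst hxs
      simp at hy; subst hy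
      rw [← Bool.not_eq_true, pvLt_iff]; omega
    | some m' =>
      rw [hfm] at hm; simp at hm
      by_cases hlt : pvLt m' x = true
      · simp [hlt] at hm; subst hm
        rcases List.mem_cons.mp hy with rfl | hy
        · rw [pvLt_iff] at hlt
          rw [← Bool.not_eq_true, pvLt_iff]; omega
        · exact ih hfm y hy
      · simp [hlt] at hm; subst hm
        rcases List.mem_cons.mp hy with rfl | hy
        · rw [← Bool.not_eq_true, pvLt_iff]; omega
        · exact pvLe_trans (Bool.eq_false_iff.mpr hlt) (ih hfm y hy)

-- the sorted pairs start with the heap's minimum, followed by the sorted erased heap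
theorem sorted2_cons_min {h : List (Int × Int)} {m : Int × Int} (hm : pvFindMin h = some m) :
    PySem.List.sorted2 h Prod.fst Prod.snd =
      m :: PySem.List.sorted2 (h.erase m) Prod.fst Prod.snd := by
  have hmem := pvFindMin_mem hm
  apply List.eq_of_perm_of_sorted (le := fun a b => pvLt b a = false)
  · intro a b _ _ hab hba
    exact pvLe_antisymm hba hab
  · exact sorted2_pvLt_pairwise h
  · refine List.Pairwise.cons ?_ (sorted2_pvLt_pairwise _)
    intro z hz
    have hz' : z ∈ h.erase m := (PySem.List.sorted2_perm _ _ _ _).mem_iff.mp hz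
    exact pvFindMin_min hm z (List.mem_of_mem_erase hz')
  · exact ((PySem.List.sorted2_perm _ _ _ _).trans (List.perm_cons_erase hmem)).trans
      ((PySem.List.sorted2_perm _ _ _ _).symm.cons m)

-- final phase: with distinct indices, sorting any rearrangement by index gives the same list
theorem sorted_snd_of_perm {g h : List (Int × Int)} (hnd : (h.map Prod.snd).Nodup)
    (hperm : g.Perm h) :
    PySem.List.sorted g (fun p => p.2) = PySem.List.sorted h (fun p => p.2) := by
  have hys : (PySem.List.sorted h (fun p => p.2)).Perm h := PySem.List.sorted_perm _ _ _
  have hle := PySem.List.sorted_pairwise h (fun p => p.2)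
  have hnd' : ((PySem.List.sorted h (fun p => p.2)).map Prod.snd).Nodup :=
    (hys.map Prod.snd).nodup_iff.mpr hnd
  have hne : (PySem.List.sorted h (fun p => p.2)).Pairwise (fun a b => a.2 ≠ b.2) :=
    List.pairwise_map.mp hnd'
  have hlt : (PySem.List.sorted h (fun p => p.2)).Pairwise (fun a b => a.2 < b.2) :=
    (hle.and hne).imp (fun ⟨h1, h2⟩ => lt_of_le_of_ne h1 h2)
  exact PySem.List.sorted_eq_of_perm_of_pairwise_lt g _ _ (hys.trans hperm.symm) hlt

theorem aLoop_nil (k t previous : Int) : aLoop k [] t previous = 0 := by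
  rw [aLoop]
  rfl

theorem aLoop_some {k : Int} {h : List (Int × Int)} {t previous : Int} {m : Int × Int}
    (hm : pvFindMin h = some m) :
    aLoop k h t previous =
      if t + (m.1 - previous) * (h.length : Int) ≤ k then
        aLoop k (h.erase m) (t + (m.1 - previous) * (h.length : Int)) m.1
      else
        match PySem.List.pyGet? (PySem.List.sorted h (fun p => p.2))
                (PySem.Int.mod (k - t) (h.length : Int)) with
        | some p => p.2
        | none => 0 := by
  rw [aLoop]
  split
  · next heq => rw [hm] at heq; exact absurd heq (by simp)
  · next m' heq => rw [hm] at heq; injection heq with heq; subst heq; rfl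

-- proof-side reference loop: the heap loop replayed on the sorted pair list
def specLoop (k : Int) : List (Int × Int) → Int → Int → Int
  | [], _, _ => 0
  | p :: rest, t, previous =>
    if k < t + (p.1 - previous) * (((p :: rest).length : Nat) : Int) then
      match PySem.List.pyGet? (PySem.List.sorted (p :: rest) (fun q => q.2))
              (PySem.Int.mod (k - t) (((p :: rest).length : Nat) : Int)) with
      | some q => q.2
      | none => 0
    else specLoop k rest (t + (p.1 - previous) * (((p :: rest).length : Nat) : Int)) p.1

-- the heap loop = the pointer scan over the sorted pairs
theorem aLoop_eq_specLoop (k : Int) : ∀ (n : Nat) (h : List (Int × Int)) (t previous : Int),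
    h.length ≤ n → (h.map Prod.snd).Nodup →
    aLoop k h t previous = specLoop k (PySem.List.sorted2 h Prod.fst Prod.snd) t previous := by
  intro n
  induction n with
  | zero =>
    intro h t previous hlen _
    have : h = [] := List.length_eq_zero_iff.mp (Nat.le_zero.mp hlen)
    subst this
    rw [aLoop_nil]
    rfl
  | succ n ih =>
    intro h t previous hlen hnd
    cases hm : pvFindMin h with
    | none =>
      have : h = [] := pvFindMin_eq_none_iff.mp hm
      subst this
      rw [aLoop_nil]
      rfl
    | some m =>
      have hmem := pvFindMin_mem hm
      have hpos : 0 < h.length := List.length_pos_of_mem hmem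
      have herase : (h.erase m).length = h.length - 1 := List.length_erase_of_mem hmem
      rw [aLoop_some hm, sorted2_cons_min hm]
      have hlenS : (PySem.List.sorted2 (h.erase m) Prod.fst Prod.snd).length
          = h.length - 1 := by
        rw [(PySem.List.sorted2_perm _ _ _ _).length_eq, herase]
      rw [specLoop]
      have hlencons : (m :: PySem.List.sorted2 (h.erase m) Prod.fst Prod.snd).length
          = h.length := by simp [hlenS]; omega
      rw [hlencons]
      by_cases hcond : t + (m.1 - previous) * (h.length : Int) ≤ k
      · rw [if_pos hcond, if_neg (by omega)]
        have hndE : ((h.erase m).map Prod.snd).Nodup :=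
          hnd.sublist (List.Sublist.map Prod.snd List.erase_sublist)
        rw [ih (h.erase m) _ _ (by omega) hndE]
      · rw [if_neg hcond, if_pos (by omega)]
        rw [sorted_snd_of_perm hnd
          (((PySem.List.sorted2_perm _ _ _ _).symm.cons m).symm.trans
            (List.perm_cons_erase hmem).symm)]

-- ===== new material: the eating-level characterisation =====

-- seconds needed beyond t to bring every pair of s down to level v, measured from level prev
def gsum (s : List (Int × Int)) (v prev : Int) : Int :=
  (s.map (fun p => min p.1 v - prev)).sum

theorem gsum_nil (v prev : Int) : gsum [] v prev = 0 := rfl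

theorem gsum_cons (p : Int × Int) (rest : List (Int × Int)) (v prev : Int) :
    gsum (p :: rest) v prev = (min p.1 v - prev) + gsum rest v prev := by
  simp [gsum]

theorem gsum_shift (v a b : Int) : ∀ (l : List (Int × Int)),
    gsum l v a = gsum l v b + (l.length : Int) * (b - a) := by
  intro l
  induction l with
  | nil => simp [gsum]
  | cons p rest ih =>
    rw [gsum_cons, gsum_cons, ih]
    simp only [List.length_cons]
    push_cast
    ring

theorem gsum_const {s : List (Int × Int)} {c : Int} (h : ∀ p ∈ s, c ≤ p.1) (prev : Int) :
    gsum s c prev = (s.length : Int) * (c - prev) := by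
  induction s with
  | nil => simp [gsum]
  | cons p rest ih =>
    rw [gsum_cons, ih (fun q hq => h q (List.mem_cons_of_mem _ hq))]
    rw [min_eq_right (h p List.mem_cons_self)]
    simp only [List.length_cons]
    push_cast
    ring

theorem gsum_ge {s : List (Int × Int)} {c v : Int} (h : ∀ p ∈ s, c ≤ p.1) (hcv : c ≤ v)
    (prev : Int) : (s.length : Int) * (c - prev) ≤ gsum s v prev := by
  induction s with
  | nil => simp [gsum]
  | cons p rest ih =>
    have h1 : c ≤ min p.1 v := le_min (h p List.mem_cons_self) hcv
    have h2 := ih (fun q hq => h q (List.mem_cons_of_mem _ hq))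
    rw [gsum_cons]
    simp only [List.length_cons]
    push_cast
    linarith

-- the pointer scan = look up position (k - g(v)) mod |survivors| among the survivors,
-- for the unique level v with g(v) ≤ k < g(v+1)
theorem specLoop_eq_core (k : Int) : ∀ (s : List (Int × Int)) (t prev v : Int),
    s.Pairwise (fun a b => pvLt b a = false) →
    t + gsum s v prev ≤ k →
    k < t + gsum s (v + 1) prev →
    specLoop k s t prev =
      (match PySem.List.pyGet?
              (PySem.List.sorted (s.filter (fun p => decide (v < p.1))) (fun q => q.2))
              (PySem.Int.mod (k - (t + gsum s v prev))
                (((s.filter (fun p => decide (v < p.1))).length : Int))) with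
       | some q => q.2
       | none => 0) := by
  intro s
  induction s with
  | nil =>
    intro t prev v _ h1 h2
    rw [gsum_nil] at h1 h2
    omega
  | cons p rest ih =>
    intro t prev v hsort h1 h2
    rw [List.pairwise_cons] at hsort
    obtain ⟨hhead, htail⟩ := hsort
    have hval : ∀ q ∈ p :: rest, p.1 ≤ q.1 := by
      intro q hq
      rcases List.mem_cons.mp hq with rfl | hq
      · exact le_refl _
      · have := hhead q hq
        rw [← Bool.not_eq_true, pvLt_iff] at this
        omega
    have hlen : (0:Int) < (((p :: rest).length : Nat) : Int) := by
      simp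
    rw [specLoop]
    by_cases hcond : k < t + (p.1 - prev) * (((p :: rest).length : Nat) : Int)
    · rw [if_pos hcond]
      have hv : v < p.1 := by
        by_contra hvp
        push_neg at hvp
        have hge := gsum_ge hval hvp prev
        rw [mul_comm] at hcond
        omega
      have hminv : gsum (p :: rest) v prev = (((p :: rest).length : Nat) : Int) * (v - prev) :=
        gsum_const (fun q hq => le_trans (le_of_lt hv) (hval q hq)) prev
      have hfilter : (p :: rest).filter (fun q => decide (v < q.1)) = p :: rest := by
        apply List.filter_eq_self.mpr
        intro q hq
        simpa using lt_of_lt_of_le hv (hval q hq)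
      rw [hfilter, hminv]
      have hmod : PySem.Int.mod (k - (t + (((p :: rest).length : Nat) : Int) * (v - prev)))
            (((p :: rest).length : Nat) : Int)
          = PySem.Int.mod (k - t) (((p :: rest).length : Nat) : Int) := by
        rw [PySem.Int.mod_eq_emod_of_pos hlen, PySem.Int.mod_eq_emod_of_pos hlen]
        have harr : k - (t + (((p :: rest).length : Nat) : Int) * (v - prev))
            = (k - t) + (((p :: rest).length : Nat) : Int) * (-(v - prev)) := by ring
        rw [harr, Int.add_mul_emod_self_left]
      rw [hmod]
    · rw [if_neg hcond]
      push_neg at hcond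
      have hv : p.1 ≤ v := by
        by_contra hvp
        push_neg at hvp
        have heq : gsum (p :: rest) (v + 1) prev
            = (((p :: rest).length : Nat) : Int) * (v + 1 - prev) :=
          gsum_const (fun q hq => le_trans (by omega) (hval q hq)) prev
        have hle : (((p :: rest).length : Nat) : Int) * (v + 1 - prev)
            ≤ (((p :: rest).length : Nat) : Int) * (p.1 - prev) :=
          mul_le_mul_of_nonneg_left (by omega) (le_of_lt hlen)
        rw [mul_comm] at hcond
        omega
      have hkey : ∀ w, p.1 ≤ w →
          t + (p.1 - prev) * (((p :: rest).length : Nat) : Int) + gsum rest w p.1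
            = t + gsum (p :: rest) w prev := by
        intro w hw
        rw [gsum_cons, min_eq_left hw, gsum_shift w p.1 prev rest]
        simp only [List.length_cons]
        push_cast
        ring
      have hfilter : (p :: rest).filter (fun q => decide (v < q.1))
          = rest.filter (fun q => decide (v < q.1)) := by
        simp [not_lt.mpr hv]
      have ht1 : t + (p.1 - prev) * (((p :: rest).length : Nat) : Int) + gsum rest v p.1 ≤ k := by
        rw [hkey v hv]; exact h1
      have ht2 : k < t + (p.1 - prev) * (((p :: rest).length : Nat) : Int) + gsum rest (v + 1) p.1 := by
        rw [hkey (v + 1) (by omega)]; exact h2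
      rw [ih _ p.1 v htail ht1 ht2, hfilter, ← hkey v hv]

-- B's g, over the original food list
def gF (food_times : List Int) (v : Int) : Int := (food_times.map (fun f => min f v)).sum

theorem gF_mono (food_times : List Int) {v w : Int} (h : v ≤ w) :
    gF food_times v ≤ gF food_times w := by
  unfold gF
  exact List.sum_le_sum (fun f _ => min_le_min le_rfl h)

theorem bsearchB_spec (food_times : List Int) (k : Int) : ∀ (n : Nat) (lo hi : Int),
    (hi - lo).toNat ≤ n → lo < hi → gF food_times lo ≤ k → k < gF food_times hi →
    gF food_times (bsearchB food_times k lo hi) ≤ k ∧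
      k < gF food_times (bsearchB food_times k lo hi + 1) := by
  intro n
  induction n with
  | zero => intro lo hi hn hlt _ _; omega
  | succ n ih =>
    intro lo hi hn hlt hlo hhi
    rw [bsearchB]
    by_cases hc : lo + 1 < hi
    · rw [if_pos hc]
      have hmid : PySem.Int.floordiv (lo + hi) 2 = (lo + hi) / 2 :=
        PySem.Int.floordiv_eq_ediv_of_pos (by omega)
      rw [hmid]
      by_cases hsum : (food_times.map (fun f => min f ((lo + hi) / 2))).sum ≤ k
      · rw [if_pos hsum]
        exact ih _ hi (by omega) (by omega) hsum hhi
      · rw [if_neg hsum]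
        exact ih lo _ (by omega) (by omega) hlo (lt_of_not_ge hsum)
    · rw [if_neg hc]
      have : hi = lo + 1 := by omega
      exact ⟨hlo, this ▸ hhi⟩

theorem pyGet?_map_helper {α β : Type} (l : List α) (f : α → β) (i : Int) :
    PySem.List.pyGet? (l.map f) i = (PySem.List.pyGet? l i).map f := by
  simp [PySem.List.pyGet?, PySem.List.pyIdx?]

theorem solution_eq (food_times : List Int) (k : Int) (hpre : Pre_solution food_times k) :
    solution food_times k = solution_alt food_times k := by
  unfold solution solution_alt
  by_cases hs : food_times.sum ≤ k
  · rw [if_pos hs, if_pos hs]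
  · have hne : food_times ≠ [] := by
      intro hnil
      subst hnil
      simp at hs
      rcases hpre with h | h
      · exact h rfl
      · omega
    obtain ⟨m, hm⟩ : ∃ m, PySem.List.max? food_times (fun x => x) = some m := by
      cases hmx : PySem.List.max? food_times (fun x => x) with
      | none => exact absurd ((PySem.List.max?_eq_none_iff _ _).mp hmx) hne
      | some m => exact ⟨m, rfl⟩
    have hnpos : (0:Int) < (food_times.length : Int) := by
      have := List.length_pos_iff.mpr hne
      exact_mod_cast this
    rw [if_neg hs, if_neg hs]
    simp only [hm]
    have hglo : gF food_times (PySem.Int.floordiv k (food_times.length : Int)) ≤ k := by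
      have h1 : gF food_times (PySem.Int.floordiv k (food_times.length : Int)) ≤
          (food_times.map (fun _ => PySem.Int.floordiv k (food_times.length : Int))).sum :=
        List.sum_le_sum (fun f _ => min_le_right _ _)
      rw [PySem.List.sum_map_const_int] at h1
      rw [PySem.Int.floordiv_eq_ediv_of_pos hnpos] at h1
      have h2 := Int.ediv_add_emod k (food_times.length : Int)
      have h3 := Int.emod_nonneg k (ne_of_gt hnpos)
      have h4 : gF food_times (PySem.Int.floordiv k (food_times.length : Int)) =
          gF food_times (k / (food_times.length : Int)) := by
        rw [PySem.Int.floordiv_eq_ediv_of_pos hnpos]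
      rw [h4]
      nlinarith
    have hghi : k < gF food_times m := by
      have hgm : gF food_times m = food_times.sum := by
        unfold gF
        have hmap : food_times.map (fun f => min f m) = food_times.map (fun f => f) :=
          List.map_congr_left (fun f hf => min_eq_left (PySem.List.max?_isMax hm f hf))
        rw [hmap, List.map_id']
      rw [hgm]
      omega
    have hlohi : PySem.Int.floordiv k (food_times.length : Int) < m := by
      by_contra hcon
      push_neg at hcon
      have := gF_mono food_times hcon
      omega
    obtain ⟨hv1, hv2⟩ := bsearchB_spec food_times k
      (m - PySem.Int.floordiv k (food_times.length : Int)).toNat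
      (PySem.Int.floordiv k (food_times.length : Int)) m le_rfl hlohi hglo hghi
    set v := bsearchB food_times k (PySem.Int.floordiv k (food_times.length : Int)) m with hvdef
    rw [PySem.List.foldl_append_singleton_eq_map (fun iv : Int × Int => (iv.2, iv.1 + 1))
      (PySem.List.enumerate food_times 0) []]
    rw [List.nil_append]
    set pairs := (PySem.List.enumerate food_times 0).map (fun iv : Int × Int => (iv.2, iv.1 + 1))
      with hpairsdef
    have hpw : pairs.Pairwise (fun a b => a.2 < b.2) := by
      rw [hpairsdef]
      refine List.pairwise_map.mpr ?_
      refine (PySem.List.pairwise_lt_enumerate food_times 0).imp ?_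
      intro a b h
      simpa using by omega
    have hnd : (pairs.map Prod.snd).Nodup :=
      List.pairwise_map.mpr (hpw.imp fun h => ne_of_lt h)
    rw [aLoop_eq_specLoop k pairs.length pairs 0 0 le_rfl hnd]
    have hgsum : ∀ w, gsum (PySem.List.sorted2 pairs Prod.fst Prod.snd) w 0
        = gF food_times w := by
      intro w
      unfold gsum gF
      rw [List.Perm.sum_eq ((PySem.List.sorted2_perm pairs Prod.fst Prod.snd false).map _)]
      rw [hpairsdef, List.map_map]
      have hc : ((fun p : Int × Int => min p.1 w - 0) ∘ fun iv : Int × Int => (iv.2, iv.1 + 1))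
          = (fun f => min f w - 0) ∘ (fun p : Int × Int => p.2) := rfl
      rw [hc, ← List.map_map, PySem.List.map_snd_enumerate]
      simp
    rw [specLoop_eq_core k _ 0 0 v (sorted2_pvLt_pairwise pairs)
      (by rw [zero_add, hgsum v]; exact hv1) (by rw [zero_add, hgsum (v + 1)]; exact hv2)]
    set enumF := (PySem.List.enumerate food_times 0).filter (fun iv => decide (v < iv.2))
      with henumF
    have hfp : pairs.filter (fun p => decide (v < p.1))
        = enumF.map (fun iv : Int × Int => (iv.2, iv.1 + 1)) := by
      rw [hpairsdef, henumF, List.filter_map]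
      rfl
    have hsorted : PySem.List.sorted
        ((PySem.List.sorted2 pairs Prod.fst Prod.snd).filter (fun p => decide (v < p.1)))
        (fun q => q.2) = pairs.filter (fun p => decide (v < p.1)) := by
      apply PySem.List.sorted_eq_of_perm_of_pairwise_lt
      · exact ((PySem.List.sorted2_perm pairs Prod.fst Prod.snd false).filter _).symm
      · exact hpw.filter _
    have hlenf : (List.filter (fun p => decide (v < p.1))
        (PySem.List.sorted2 pairs Prod.fst Prod.snd)).length = enumF.length := by
      rw [((PySem.List.sorted2_perm pairs Prod.fst Prod.snd false).filter _).length_eq, hfp,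
        List.length_map]
    rw [hsorted, hfp, hlenf]
    have hgf : (food_times.map (fun f => min f v)).sum = gF food_times v := rfl
    rw [hgf, zero_add, hgsum v]
    simp only [List.length_map]
    rw [pyGet?_map_helper, pyGet?_map_helper]
    cases PySem.List.pyGet? enumF
        (PySem.Int.mod (k - gF food_times v) ((enumF.length : Nat) : Int)) <;> rfl

-- ===== VERDICT (by name: the statement is the Claim_ definition above) =====
theorem solution_spec : Claim_equal_solution := by
  intro food_times k _ hpre
  unfold Spec_solution
  exact solution_eq food_times k hpre
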